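-- pv_equiv track=rewrite | github.com/EstaFaith/solitaire | solitaire_terminal/Card.py | cardLogic
-- ===== SOURCE A (Python) =====
-- def cardLogic(firstCard, secondCard):
--     """ compares card selections """
--     firstComparison = firstCard
--     secondComparison = secondCard
--     if firstCard > 13:  # these if and while statements take any card number 1-52 and compares them as 1-13 number
--         firstComparison = firstCard - 13
--         while firstComparison > 13:
--             firstComparison -= 13
--     if secondCard > 13:
--         secondComparison = secondCard - 13
--         while secondComparison > 13:
--             secondComparison -= 13
--     if firstComparison + secondComparison == 13:  # if the cards add to 13 then the cards can then be moved to the foundation pile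
--         return "pass"
--     else:
--         return "fail"
-- ===== SOURCE B (Python) =====
-- def cardLogic(firstCard, secondCard):
--     """ compares card selections """
--     def reduced(c):
--         return ((c - 1) % 13) + 1 if c > 13 else c
--     return "pass" if reduced(firstCard) + reduced(secondCard) == 13 else "fail"
-- ===== Notes on version B (the rewrite author's own statement) =====
-- stated objective: simpler
-- what changed: Replaces the two while-loop repeated subtractions with a closed-form modulo reduction ((c-1) % 13) + 1 for c > 13.
import Mathlib
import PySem

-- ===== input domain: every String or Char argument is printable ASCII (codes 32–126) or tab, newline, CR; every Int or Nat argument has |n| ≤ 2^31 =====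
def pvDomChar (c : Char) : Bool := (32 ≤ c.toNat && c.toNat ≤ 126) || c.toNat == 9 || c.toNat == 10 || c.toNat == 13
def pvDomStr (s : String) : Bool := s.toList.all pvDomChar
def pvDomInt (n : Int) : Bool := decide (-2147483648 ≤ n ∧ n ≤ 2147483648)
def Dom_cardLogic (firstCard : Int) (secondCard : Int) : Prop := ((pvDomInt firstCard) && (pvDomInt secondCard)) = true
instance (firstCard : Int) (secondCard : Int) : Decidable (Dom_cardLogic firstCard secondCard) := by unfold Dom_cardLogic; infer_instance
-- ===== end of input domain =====

-- B replaces A's two while-loop repeated subtractions by a closed-form modulo reduction (objective: simpler).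

-- ===== PORT A =====
-- the 'while comparison > 13: comparison -= 13' loop of A
def pvWhile13 (x : Int) : Int :=
  if h : x > 13 then pvWhile13 (x - 13) else x
termination_by x.toNat
decreasing_by omega

def cardLogic (firstCard : Int) (secondCard : Int) : String :=
  let firstComparison := if firstCard > 13 then pvWhile13 (firstCard - 13) else firstCard
  let secondComparison := if secondCard > 13 then pvWhile13 (secondCard - 13) else secondCard
  if firstComparison + secondComparison == 13 then "pass" else "fail"

-- ===== PORT B =====
def pvReduced (c : Int) : Int :=
  if c > 13 then PySem.Int.mod (c - 1) 13 + 1 else c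

def cardLogic_alt (firstCard : Int) (secondCard : Int) : String :=
  if pvReduced firstCard + pvReduced secondCard == 13 then "pass" else "fail"

-- ===== PRECONDITION & SPEC =====
def Spec_cardLogic (firstCard : Int) (secondCard : Int) (out : String) : Prop := out = cardLogic_alt firstCard secondCard
instance (firstCard : Int) (secondCard : Int) (out : String) : Decidable (Spec_cardLogic firstCard secondCard out) := by unfold Spec_cardLogic; infer_instance

-- ===== CLAIM (what is proved, stated in full; the proofs are below) =====
def Claim_equal_cardLogic : Prop := ∀ (firstCard : Int) (secondCard : Int), Dom_cardLogic firstCard secondCard → Spec_cardLogic firstCard secondCard (cardLogic firstCard secondCard)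

-- ===== LEMMAS AND PROOFS =====

-- A's subtraction loop computes the closed form on positive inputs.
theorem pvWhile13_closed (x : Int) (hx : 1 ≤ x) : pvWhile13 x = (x - 1) % 13 + 1 := by
  by_cases h : x > 13
  · have ih := pvWhile13_closed (x - 13) (by omega)
    rw [pvWhile13, dif_pos h, ih]
    omega
  · rw [pvWhile13, dif_neg h]
    omega
termination_by x.toNat
decreasing_by omega

theorem reduced_eq (c : Int) :
    (if c > 13 then pvWhile13 (c - 13) else c) = pvReduced c := by
  unfold pvReduced
  by_cases h : c > 13
  · rw [if_pos h, if_pos h, pvWhile13_closed (c - 13) (by omega)]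
    simp only [PySem.Int.mod]
    rw [Int.fmod_eq_emod]
    omega
  · rw [if_neg h, if_neg h]

-- ===== VERDICT (by name: the statement is the Claim_ definition above) =====
theorem cardLogic_spec : Claim_equal_cardLogic := by
  intro f s _
  unfold Spec_cardLogic cardLogic cardLogic_alt
  rw [reduced_eq, reduced_eq]
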